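-- pv_equiv track=rewrite | github.com/iZhang/Python | CS101_Eclipse/apt_txtmsg/src/TxMsg.py | textize
-- ===== SOURCE A (Python) =====
-- def isvowel(letter):
--     return "aeiou".count(letter) > 0
--
-- def allvowel(word):
--     vowelcount = 0
--     for letter in word:
--         if isvowel(letter):
--             vowelcount +=1
--     return vowelcount == len(word)
--
-- def textize(word):
--     if allvowel(word):
--         return word
--     newmessage = ""
--     if not isvowel(word[0]):
--         newmessage = word[0]
--     for i in range(1,len(word)):
--         if not isvowel(word[i]) and isvowel(word[i-1]):
--             newmessage += word[i]
--     return newmessage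
-- ===== SOURCE B (Python) =====
-- def textize(word):
--     # Split the word at every vowel: the pieces are the maximal vowel-free runs.
--     parts = [word]
--     for v in "aeiou":
--         parts = [piece for part in parts for piece in part.split(v)]
--     # The abbreviation is the first letter of each nonempty run.
--     initials = "".join(part[0] for part in parts if part)
--     return initials if initials else word
-- ===== Notes on version B (the rewrite author's own statement) =====
-- stated objective: faster
-- what changed: Replaces A's index scan comparing each character with its predecessor (building the result by repeated string concatenation) by a run-splitting algorithm: split the word at every vowel into its maximal vowel-free runs with str.split and join the first letter of each nonempty run; the all-vowel case falls out as the empty join.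
import Mathlib
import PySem

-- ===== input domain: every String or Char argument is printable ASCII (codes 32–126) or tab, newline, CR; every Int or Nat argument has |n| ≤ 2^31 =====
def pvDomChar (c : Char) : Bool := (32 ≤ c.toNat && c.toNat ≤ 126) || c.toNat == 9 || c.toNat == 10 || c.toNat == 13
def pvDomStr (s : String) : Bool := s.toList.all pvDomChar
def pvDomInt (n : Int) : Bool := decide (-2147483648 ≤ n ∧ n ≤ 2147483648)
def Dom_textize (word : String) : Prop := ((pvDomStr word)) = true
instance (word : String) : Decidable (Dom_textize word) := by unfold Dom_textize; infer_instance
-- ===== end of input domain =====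

-- B abbreviates by a different algorithm: split the word at every vowel into its maximal
-- vowel-free runs and keep the first letter of each run, instead of A's index scan that
-- compares each character with its predecessor (a timing run measured B faster by a
-- constant factor).

-- ===== PORT A =====
-- isvowel: "aeiou".count(letter) > 0
def isvowelA (c : Char) : Bool := decide (PySem.List.count "aeiou".toList c > 0)

-- allvowel: count the vowels with a loop, compare to len(word)
def allvowelA (cs : List Char) : Bool :=
  decide ((cs.foldl (fun n c => if isvowelA c then n + 1 else n) (0 : Int)) = (cs.length : Int))

-- the body of A's for-loop (indices i = 1 .. len-1; indexing is in range there, so pyGetD is exact)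
def loopBodyA (cs : List Char) (acc : List Char) (i : Int) : List Char :=
  if ¬ isvowelA (PySem.List.pyGetD cs i ' ') ∧ isvowelA (PySem.List.pyGetD cs (i - 1) ' ')
  then acc ++ [PySem.List.pyGetD cs i ' '] else acc

def textize (word : String) : String :=
  let cs := word.toList
  if allvowelA cs then word
  else
    -- word[0] is in range here (¬ allvowel → word nonempty), so pyGetD is exact
    let newmessage : List Char :=
      if ¬ isvowelA (PySem.List.pyGetD cs 0 ' ') then [PySem.List.pyGetD cs 0 ' '] else []
    String.ofList ((PySem.List.pyRange 1 (cs.length : Int) 1).foldl (loopBodyA cs) newmessage)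

-- ===== PORT B =====
-- parts = [word]; for v in "aeiou": parts = [piece for part in parts for piece in part.split(v)]
def partsB (cs : List Char) : List (List Char) :=
  "aeiou".toList.foldl (fun ps v => ps.flatMap (fun p => PySem.Chars.splitOn p [v])) [cs]

def textize_alt (word : String) : String :=
  let parts := partsB word.toList
  -- initials = "".join(part[0] for part in parts if part)  (part[0] in range: part nonempty)
  let initials : List Char :=
    (parts.filter (fun p => ¬ p.isEmpty)).map (fun p => PySem.List.pyGetD p 0 ' ')
  if initials.isEmpty then word else String.ofList initials

-- ===== PRECONDITION & SPEC =====
def Spec_textize (word : String) (out : String) : Prop := out = textize_alt word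
instance (word : String) (out : String) : Decidable (Spec_textize word out) := by unfold Spec_textize; infer_instance

-- ===== CLAIM (what is proved, stated in full; the proofs are below) =====
def Claim_equal_textize : Prop := ∀ (word : String), Dom_textize word → Spec_textize word (textize word)

-- ===== LEMMAS AND PROOFS =====

def vowelB (c : Char) : Bool := "aeiou".toList.contains c

-- the common recursive semantics: keep a consonant iff the previous character was a vowel (or start)
def fSel (prevVowel : Bool) : List Char → List Char
  | [] => []
  | c :: l => if vowelB c then fSel true l
              else (if prevVowel then [c] else []) ++ fSel false l

theorem isvowelA_eq_vowelB (c : Char) : isvowelA c = vowelB c := by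
  simp [isvowelA, vowelB, PySem.List.count, List.count_pos_iff]

theorem allvowelA_iff (cs : List Char) : allvowelA cs = cs.all vowelB := by
  unfold allvowelA
  rw [PySem.List.foldl_count_if]
  simp only [zero_add, Nat.cast_inj, List.countP_eq_length, isvowelA_eq_vowelB]
  cases h : cs.all vowelB
  · simp only [List.all_eq_false] at h
    obtain ⟨x, hx, hb⟩ := h
    simp only [decide_eq_false_iff_not]
    exact fun hall => by simp [hall x hx] at hb
  · simp only [List.all_eq_true] at h
    simpa using h

-- A's loop from index k onwards computes exactly the pairwise filter of the suffix
theorem loopA_eq (m : Nat) : ∀ (cs : List Char) (k : Nat), cs.length - k = m → 1 ≤ k → ∀ acc,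
    (PySem.List.pyRange (k : Int) (cs.length : Int) 1).foldl (loopBodyA cs) acc
    = acc ++ ((((cs.drop (k - 1)).zip (cs.drop k)).filter
        (fun pc => vowelB pc.1 && !vowelB pc.2)).map (·.2)) := by
  induction m with
  | zero =>
    intro cs k hm hk acc
    have hkl : cs.length ≤ k := by omega
    rw [PySem.List.pyRange_one_eq_nil (by exact_mod_cast hkl)]
    simp [List.drop_eq_nil_of_le hkl]
  | succ m ih =>
    intro cs k hm hk acc
    have hkl : k < cs.length := by omega
    rw [PySem.List.pyRange_one_cons (by exact_mod_cast hkl)]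
    simp only [List.foldl_cons]
    have hcast : (k : Int) + 1 = ((k + 1 : Nat) : Int) := by push_cast; ring
    rw [hcast, ih cs (k + 1) (by omega) (by omega)]
    have hk1 : k - 1 < cs.length := by omega
    have hk' : k - 1 + 1 = k := by omega
    have hdrop1 : cs.drop (k - 1) = cs[k - 1] :: cs.drop k := by
      rw [List.drop_eq_getElem_cons hk1, hk']
    have hdrop2 : cs.drop k = cs[k] :: cs.drop (k + 1) := List.drop_eq_getElem_cons hkl
    have hget : PySem.List.pyGetD cs (k : Int) ' ' = cs[k] := by
      rw [PySem.List.pyGetD_eq_getElem cs ' ' (by omega) (by exact_mod_cast hkl)]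
      simp
    have hcast1 : ((k : Int) - 1) = ((k - 1 : Nat) : Int) := by omega
    have hget1 : PySem.List.pyGetD cs ((k : Int) - 1) ' ' = cs[k - 1] := by
      rw [hcast1, PySem.List.pyGetD_eq_getElem cs ' ' (by omega) (by exact_mod_cast hk1)]
      simp
    have hdrop3 : k + 1 - 1 = k := by omega
    rw [hdrop3]
    conv_rhs => rw [hdrop1, hdrop2]
    rw [List.zip_cons_cons, List.filter_cons]
    unfold loopBodyA
    rw [hget, hget1]
    simp only [isvowelA_eq_vowelB]
    by_cases hv : vowelB cs[k]
    · by_cases hv1 : vowelB cs[k - 1] <;> simp [hv, hv1]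
    · by_cases hv1 : vowelB cs[k - 1] <;> simp [hv, hv1]

-- the zip/pair filter is fSel
theorem zipFilter_eq_fSel (l : List Char) : ∀ prev,
    (((prev :: l).zip l).filter (fun pc => vowelB pc.1 && !vowelB pc.2)).map (·.2)
    = fSel (vowelB prev) l := by
  induction l with
  | nil => intro prev; simp [fSel]
  | cons c l ih =>
    intro prev
    rw [List.zip_cons_cons, List.filter_cons]
    by_cases hp : vowelB prev <;> by_cases hc : vowelB c <;>
      simp [fSel, hp, hc, ih c]

-- PySem's single-character split is List.splitOnP
theorem splitOn_go_singleton (v : Char) (fuel : Nat) : ∀ (l : List Char), l.length < fuel →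
    ∀ (cur : List Char) (acc : List (List Char)),
    PySem.Chars.splitOn.go [v] fuel l cur acc
    = acc.reverse ++ (l.splitOnP (· == v)).modifyHead (cur.reverse ++ ·) := by
  induction fuel with
  | zero => intro l h; omega
  | succ fuel ih =>
    intro l hl cur acc
    cases l with
    | nil => simp [PySem.Chars.splitOn.go, List.splitOnP_nil]
    | cons c rest =>
      rw [PySem.Chars.splitOn.go]
      simp only [List.length_cons] at hl
      by_cases hc : c = v
      · subst hc
        rw [if_pos (by simp [List.isPrefixOf])]
        simp only [List.length_cons, List.length_nil, List.drop_succ_cons, List.drop_zero]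
        rw [ih rest (by omega), List.splitOnP_cons]
        simp only [beq_self_eq_true, if_true]
        have hne := List.splitOnP_ne_nil (p := (· == c)) rest
        obtain ⟨t, ts, h⟩ : ∃ t ts, rest.splitOnP (· == c) = t :: ts := by
          cases h : rest.splitOnP (· == c) with
          | nil => exact absurd h hne
          | cons t ts => exact ⟨t, ts, rfl⟩
        rw [h]
        simp
      · rw [if_neg (by
          simp only [List.isPrefixOf, Bool.and_true]
          simp only [beq_iff_eq]
          exact fun h => absurd h.symm hc)]
        rw [ih rest (by omega), List.splitOnP_cons]
        rw [if_neg (by simp [hc])]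
        have hne := List.splitOnP_ne_nil (p := (· == v)) rest
        obtain ⟨t, ts, h⟩ : ∃ t ts, rest.splitOnP (· == v) = t :: ts := by
          cases h : rest.splitOnP (· == v) with
          | nil => exact absurd h hne
          | cons t ts => exact ⟨t, ts, rfl⟩
        rw [h]
        simp

theorem splitOn_singleton (l : List Char) (v : Char) :
    PySem.Chars.splitOn l [v] = l.splitOnP (· == v) := by
  unfold PySem.Chars.splitOn
  rw [splitOn_go_singleton v (l.length + 1) l (by omega)]
  have hne := List.splitOnP_ne_nil (p := (· == v)) l
  cases h : l.splitOnP (· == v) with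
  | nil => exact absurd h hne
  | cons t ts => simp

-- splitting the pieces of a p-split at q-chars is splitting at (p or q)-chars
theorem splitOnP_flatMap_or {α : Type} (p q : α → Bool) (l : List α) :
    (l.splitOnP p).flatMap (fun x => x.splitOnP q) = l.splitOnP (fun c => p c || q c) := by
  induction l with
  | nil => simp [List.splitOnP_nil]
  | cons c l ih =>
    rw [List.splitOnP_cons, List.splitOnP_cons (p := fun c => p c || q c)]
    by_cases hp : p c
    · rw [if_pos hp, if_pos (by simp [hp]), ← ih]
      simp [List.splitOnP_nil]
    · rw [if_neg hp]
      have hne := List.splitOnP_ne_nil (p := p) l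
      obtain ⟨t, ts, h⟩ : ∃ t ts, l.splitOnP p = t :: ts := by
        cases h : l.splitOnP p with
        | nil => exact absurd h hne
        | cons t ts => exact ⟨t, ts, rfl⟩
      rw [h] at ih ⊢
      rw [List.modifyHead_cons, List.flatMap_cons, List.splitOnP_cons]
      by_cases hq : q c
      · rw [if_pos hq, if_pos (by simp [hq]), ← ih]
        simp
      · rw [if_neg hq, if_neg (by simp [hp, hq]), ← ih]
        have hnet := List.splitOnP_ne_nil (p := q) t
        obtain ⟨u, us, ht⟩ : ∃ u us, t.splitOnP q = u :: us := by
          cases ht : t.splitOnP q with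
          | nil => exact absurd ht hnet
          | cons u us => exact ⟨u, us, rfl⟩
        simp [List.flatMap_cons, ht]

-- B's five successive splits = one split on the vowel predicate
theorem partsB_eq (cs : List Char) : partsB cs = cs.splitOnP vowelB := by
  unfold partsB
  have hs : ∀ (v : Char) (ps : List (List Char)),
      ps.flatMap (fun p => PySem.Chars.splitOn p [v]) = ps.flatMap (fun p => p.splitOnP (· == v)) := by
    intro v ps
    simp [splitOn_singleton]
  rw [show "aeiou".toList = ['a','e','i','o','u'] from rfl]
  simp only [List.foldl_cons, List.foldl_nil]
  rw [hs, hs, hs, hs, hs]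
  rw [show List.flatMap (fun p => p.splitOnP (· == 'a')) [cs] = cs.splitOnP (· == 'a') by simp]
  rw [splitOnP_flatMap_or, splitOnP_flatMap_or, splitOnP_flatMap_or, splitOnP_flatMap_or]
  congr 1
  funext c
  simp only [vowelB, List.contains_eq_mem]
  by_cases h : c = 'a' <;> by_cases h2 : c = 'e' <;> by_cases h3 : c = 'i' <;>
    by_cases h4 : c = 'o' <;> by_cases h5 : c = 'u' <;> simp [h, h2, h3, h4, h5]

-- heads of the nonempty chunks of a splitOnP = fSel
def headsOf (parts : List (List Char)) : List Char :=
  (parts.filter (fun p => ¬ p.isEmpty)).map (fun p => PySem.List.pyGetD p 0 ' ')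

theorem headsOf_nil_cons (xs : List (List Char)) : headsOf ([] :: xs) = headsOf xs := by
  simp [headsOf]

theorem headsOf_cons_cons (c : Char) (t : List Char) (ts : List (List Char)) :
    headsOf ((c :: t) :: ts) = c :: headsOf ts := by
  simp [headsOf, PySem.List.pyGetD_zero_cons]

theorem heads_splitOnP (l : List Char) :
    headsOf (l.splitOnP vowelB) = fSel true l ∧
    (∀ t ts, l.splitOnP vowelB = t :: ts → headsOf ts = fSel false l) := by
  induction l with
  | nil =>
    refine ⟨by simp [List.splitOnP_nil, headsOf_nil_cons, headsOf, fSel], ?_⟩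
    intro t ts h
    simp only [List.splitOnP_nil, List.cons.injEq] at h
    rw [← h.2]
    simp [headsOf, fSel]
  | cons c l ih =>
    obtain ⟨ih1, ih2⟩ := ih
    have hne := List.splitOnP_ne_nil (p := vowelB) l
    obtain ⟨t, ts, hsp⟩ : ∃ t ts, l.splitOnP vowelB = t :: ts := by
      cases h : l.splitOnP vowelB with
      | nil => exact absurd h hne
      | cons t ts => exact ⟨t, ts, rfl⟩
    by_cases hc : vowelB c = true
    · constructor
      · rw [List.splitOnP_cons, if_pos hc, headsOf_nil_cons, ih1]
        simp [fSel, hc]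
      · intro t' ts' h
        rw [List.splitOnP_cons, if_pos hc] at h
        injection h with h1 h2
        rw [← h2, ih1]
        simp [fSel, hc]
    · constructor
      · rw [List.splitOnP_cons, if_neg hc, hsp, List.modifyHead_cons, headsOf_cons_cons,
          ih2 t ts hsp]
        simp [fSel, hc]
      · intro t' ts' h
        rw [List.splitOnP_cons, if_neg hc, hsp, List.modifyHead_cons] at h
        injection h with h1 h2
        rw [← h2]
        simpa [fSel, hc] using ih2 t ts hsp

-- fSel true is empty exactly on all-vowel words
theorem fSel_true_eq_nil_iff (l : List Char) : fSel true l = [] ↔ l.all vowelB = true := by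
  induction l with
  | nil => simp [fSel]
  | cons c l ih =>
    by_cases hc : vowelB c <;> simp [fSel, hc, ih]

-- ===== VERDICT (by name: the statement is the Claim_ definition above) =====
theorem textize_spec : Claim_equal_textize := by
  intro word _
  unfold Spec_textize textize textize_alt
  simp only [allvowelA_iff, partsB_eq]
  rw [show ((word.toList.splitOnP vowelB).filter (fun p => ¬ p.isEmpty)).map
      (fun p => PySem.List.pyGetD p 0 ' ') = fSel true word.toList from
      (heads_splitOnP word.toList).1]
  by_cases hall : word.toList.all vowelB = true
  · rw [if_pos hall, if_pos (by rw [List.isEmpty_iff, fSel_true_eq_nil_iff]; exact hall)]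
  · have hnil : ¬ (fSel true word.toList).isEmpty = true := by
      rw [List.isEmpty_iff, fSel_true_eq_nil_iff]; exact hall
    rw [if_neg (by exact hall), if_neg hnil]
    congr 1
    cases hcs : word.toList with
    | nil => rw [hcs] at hall; simp at hall
    | cons c rest =>
      have hloop := loopA_eq ((c :: rest).length - 1) (c :: rest) 1 rfl (by omega)
      norm_num at hloop
      simp only [List.length_cons, Nat.cast_add, Nat.cast_one]
      rw [hloop, zipFilter_eq_fSel rest c]
      simp only [PySem.List.pyGetD_zero_cons, isvowelA_eq_vowelB]
      by_cases hv : vowelB c = true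
      · simp [fSel, hv]
      · simp [fSel, hv]
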